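-- pv_equiv track=rewrite | github.com/joshanashakya/dissertation | workspace/dataset/java-python/GeeksForGeeks/2992/A/2.py | maxcoefficientvalue
-- ===== SOURCE A (Python) =====
-- def maxcoefficientvalue(n):
--     C = [[0 for x in range(n + 1)]
--             for y in range(n + 1)];
--
--     # Calculate value of
--     # Binomial Coefficient in
--     # bottom up manner
--     for i in range(n + 1):
--         for j in range(min(i, n) + 1):
--
--             # Base Cases
--             if (j == 0 or j == i):
--                 C[i][j] = 1;
--
--             # Calculate value
--             # using previously
--             # stored values
--             else:
--                 C[i][j] = (C[i - 1][j - 1] +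
--                            C[i - 1][j]);
--
--     # finding the maximum value.
--     maxvalue = 0;
--     for i in range(n + 1):
--         maxvalue = max(maxvalue, C[n][i]);
--
--     return maxvalue;
-- ===== SOURCE B (Python) =====
-- def maxcoefficientvalue(n):
--     # O(n): the max of row n of Pascal's triangle is the central binomial
--     # coefficient C(n, n//2), computed by the multiplicative formula.
--     if n < 0:
--         return 0
--     res = 1
--     for i in range(n // 2):
--         res = res * (n - i) // (i + 1)
--     return res
-- ===== Notes on version B (the rewrite author's own statement) =====
-- stated objective: faster
-- what changed: Replaces the O(n^2) dynamic-programming Pascal table plus a scan of its last row by a single O(n) multiplicative computation of the central binomial coefficient C(n, n//2).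
import Mathlib
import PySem

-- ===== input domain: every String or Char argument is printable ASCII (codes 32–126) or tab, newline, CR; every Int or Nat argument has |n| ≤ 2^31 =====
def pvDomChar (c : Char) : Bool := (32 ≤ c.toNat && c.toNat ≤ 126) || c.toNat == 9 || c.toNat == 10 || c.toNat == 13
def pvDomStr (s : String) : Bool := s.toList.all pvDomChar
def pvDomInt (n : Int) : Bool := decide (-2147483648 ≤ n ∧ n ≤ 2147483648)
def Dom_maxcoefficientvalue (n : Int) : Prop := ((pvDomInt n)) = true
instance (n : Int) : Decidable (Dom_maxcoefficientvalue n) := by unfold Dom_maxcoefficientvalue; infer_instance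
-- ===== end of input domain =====

-- B replaces A's O(n^2) Pascal-triangle table (plus a scan of its last row) by a single
-- multiplicative-formula loop for the central binomial coefficient C(n, n//2).

-- ===== PORT A =====
-- `C[i][j] = v` on the nested list (Python's in-place row assignment; indices in range here)
def pySet2 (C : List (List Int)) (i j : Int) (v : Int) : List (List Int) :=
  PySem.List.pySetD C i (PySem.List.pySetD (PySem.List.pyGetD C i []) j v)

-- body of A's inner `for j` loop
def innerBody (C : List (List Int)) (i j : Int) : List (List Int) :=
  if j = 0 ∨ j = i then pySet2 C i j 1
  else pySet2 C i j (PySem.List.pyGetD (PySem.List.pyGetD C (i-1) []) (j-1) 0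
                     + PySem.List.pyGetD (PySem.List.pyGetD C (i-1) []) j 0)

def maxcoefficientvalue (n : Int) : Int :=
  let C0 : List (List Int) :=
    (PySem.List.pyRange 0 (n+1) 1).map (fun _ =>
      (PySem.List.pyRange 0 (n+1) 1).map (fun _ => (0:Int)))
  let C := (PySem.List.pyRange 0 (n+1) 1).foldl
      (fun C i => (PySem.List.pyRange 0 (min i n + 1) 1).foldl (fun C j => innerBody C i j) C) C0
  (PySem.List.pyRange 0 (n+1) 1).foldl
      (fun m i => max m (PySem.List.pyGetD (PySem.List.pyGetD C n []) i 0)) 0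

-- ===== PORT B =====
def maxcoefficientvalue_alt (n : Int) : Int :=
  if n < 0 then 0
  else (PySem.List.pyRange 0 (PySem.Int.floordiv n 2) 1).foldl
        (fun res i => PySem.Int.floordiv (res * (n - i)) (i + 1)) 1

-- ===== PRECONDITION & SPEC =====
def Spec_maxcoefficientvalue (n : Int) (out : Int) : Prop := out = maxcoefficientvalue_alt n
instance (n : Int) (out : Int) : Decidable (Spec_maxcoefficientvalue n out) := by unfold Spec_maxcoefficientvalue; infer_instance

-- ===== CLAIM (what is proved, stated in full; the proofs are below) =====
def Claim_equal_maxcoefficientvalue : Prop := ∀ (n : Int), Dom_maxcoefficientvalue n → Spec_maxcoefficientvalue n (maxcoefficientvalue n)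

-- ===== LEMMAS AND PROOFS =====

-- the value cell (i,j) holds once the inner loop of row i has processed j-values < t
def entryA (i j t : Nat) : Int := if j < t then ((i.choose j : Nat) : Int) else 0
-- row i of A's table after t inner-loop steps (N = n+1 columns)
def partRow (i t N : Nat) : List Int := (List.range N).map (fun j => entryA i j t)

lemma set_map_range {α : Type} (g : Nat → α) (N j : Nat) (v : α) :
    ((List.range N).map g).set j v = (List.range N).map (fun x => if x = j then v else g x) := by
  apply List.ext_getElem
  · simp
  · intro k h1 h2
    simp only [List.getElem_set, List.getElem_map, List.getElem_range]
    by_cases h : j = k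
    · subst h; simp
    · rw [if_neg h, if_neg (by omega)]

lemma getD_map_range' {α : Type} (g : Nat → α) (N j : Nat) (hj : j < N) (d : α) :
    PySem.List.pyGetD ((List.range N).map g) (j : Int) d = g j := by
  rw [PySem.List.pyGetD_natCast]
  rw [List.getD_eq_getElem _ _ (by simpa using hj)]
  simp

lemma set2_map (G : Nat → List Int) (N i j : Nat) (hi : i < N) (v : Int) :
    pySet2 ((List.range N).map G) (i : Int) (j : Int) v
      = (List.range N).map (fun r => if r = i then (G i).set j v else G r) := by
  unfold pySet2
  rw [getD_map_range' G N i hi, PySem.List.pySetD_natCast, PySem.List.pySetD_natCast,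
    set_map_range]

lemma partRow_set (i t N : Nat) (v : Int) (hv : ((i.choose t : Nat) : Int) = v) :
    (partRow i t N).set t v = partRow i (t+1) N := by
  unfold partRow
  rw [set_map_range]
  apply List.map_congr_left
  intro x hx
  simp only [entryA]
  by_cases h : x = t
  · subst h; rw [if_pos rfl, if_pos (by omega), hv]
  · rw [if_neg h]
    by_cases h2 : x < t
    · rw [if_pos h2, if_pos (by omega)]
    · rw [if_neg h2, if_neg (by omega)]

lemma partRow_getD (i t N j : Nat) (hj : j < N) :
    PySem.List.pyGetD (partRow i t N) (j : Int) 0 = entryA i j t :=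
  getD_map_range' _ N j hj 0

lemma partRow_zero (i i' N : Nat) : partRow i 0 N = partRow i' 0 N := by
  simp [partRow, entryA]

lemma inner_loop (n' i : Nat) (hi : i ≤ n') (F : Nat → List Int)
    (hFi : F i = partRow i 0 (n'+1))
    (hF : ∀ r, r < i → F r = partRow r (r+1) (n'+1)) :
    ∀ t, t ≤ i + 1 →
    (PySem.List.pyRange 0 (t : Int) 1).foldl (fun C j => innerBody C (i : Int) j)
        ((List.range (n'+1)).map F)
      = (List.range (n'+1)).map (fun r => if r = i then partRow i t (n'+1) else F r) := by
  intro t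
  induction t with
  | zero =>
    intro _
    rw [PySem.List.pyRange_one_eq_nil (by simp)]
    simp only [List.foldl_nil]
    apply List.map_congr_left
    intro r _
    by_cases h : r = i
    · subst h; rw [if_pos rfl, hFi]
    · rw [if_neg h]
  | succ t ih =>
    intro ht
    have ht' : t ≤ i + 1 := by omega
    rw [show ((t+1 : Nat) : Int) = (t : Int) + 1 by push_cast; ring,
        PySem.List.pyRange_one_succ_right (by positivity), List.foldl_append, ih ht']
    simp only [List.foldl_cons, List.foldl_nil]
    set G : Nat → List Int := fun r => if r = i then partRow i t (n'+1) else F r with hG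
    have hGi : G i = partRow i t (n'+1) := by simp [hG]
    have hiN : i < n' + 1 := by omega
    have htN : t < n' + 1 := by omega
    unfold innerBody
    by_cases hcase : (t : Int) = 0 ∨ (t : Int) = (i : Int)
    · rw [if_pos hcase]
      rw [set2_map G (n'+1) i t hiN 1, hGi]
      have hch : ((i.choose t : Nat) : Int) = 1 := by
        rcases hcase with h | h
        · have : t = 0 := by exact_mod_cast h
          subst this; simp
        · have : t = i := by exact_mod_cast h
          subst this; simp
      rw [partRow_set i t (n'+1) 1 hch]
      apply List.map_congr_left
      intro r _
      by_cases h : r = i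
      · subst h; rw [if_pos rfl, if_pos rfl]
      · rw [if_neg h, if_neg h, hG]; simp [h]
    · rw [if_neg hcase]
      push Not at hcase
      have ht0 : t ≠ 0 := by intro h; exact hcase.1 (by exact_mod_cast h)
      have hti : t ≠ i := by intro h; exact hcase.2 (by exact_mod_cast h)
      have hti' : t < i := by omega
      have h1 : ((i : Int) - 1) = ((i - 1 : Nat) : Int) := by omega
      have h2 : ((t : Int) - 1) = ((t - 1 : Nat) : Int) := by omega
      rw [h1, h2]
      rw [getD_map_range' G (n'+1) (i-1) (by omega) []]
      have hGim : G (i-1) = partRow (i-1) ((i-1)+1) (n'+1) := by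
        rw [hG]; simp only [if_neg (show i-1 ≠ i by omega)]
        exact hF (i-1) (by omega)
      rw [hGim, partRow_getD _ _ _ _ (by omega), partRow_getD _ _ _ _ (by omega)]
      simp only [entryA]
      rw [if_pos (show t - 1 < (i-1)+1 by omega), if_pos (show t < (i-1)+1 by omega)]
      rw [set2_map G (n'+1) i t hiN _, hGi]
      have hsum : ((i-1).choose (t-1) : Int) + ((i-1).choose t : Int)
          = ((i.choose t : Nat) : Int) := by
        have hnat : (i-1).choose (t-1) + (i-1).choose t = i.choose t := by
          conv_rhs => rw [show i = (i-1)+1 by omega, show t = (t-1)+1 by omega]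
          rw [Nat.choose_succ_succ, Nat.succ_eq_add_one, show (t-1)+1 = t by omega]
        exact_mod_cast hnat
      rw [hsum, partRow_set i t (n'+1) _ rfl]
      apply List.map_congr_left
      intro r _
      by_cases h : r = i
      · subst h; rw [if_pos rfl, if_pos rfl]
      · rw [if_neg h, if_neg h, hG]; simp [h]

lemma outer_loop (n' : Nat) : ∀ k, k ≤ n'+1 →
    (PySem.List.pyRange 0 (k : Int) 1).foldl
      (fun C i => (PySem.List.pyRange 0 (min i (n' : Int) + 1) 1).foldl (fun C j => innerBody C i j) C)
      ((List.range (n'+1)).map (fun _ => partRow 0 0 (n'+1)))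
    = (List.range (n'+1)).map (fun r => if r < k then partRow r (r+1) (n'+1) else partRow 0 0 (n'+1)) := by
  intro k
  induction k with
  | zero =>
    intro _
    rw [PySem.List.pyRange_one_eq_nil (by simp)]
    simp
  | succ k ih =>
    intro hk
    rw [show ((k+1 : Nat) : Int) = (k : Int) + 1 by push_cast; ring,
        PySem.List.pyRange_one_succ_right (by positivity), List.foldl_append, ih (by omega)]
    simp only [List.foldl_cons, List.foldl_nil]
    have hmin : min (k : Int) (n' : Int) = (k : Int) := by
      simp; omega
    rw [hmin, show ((k : Int) + 1) = ((k+1 : Nat) : Int) by push_cast; ring]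
    rw [inner_loop n' k (by omega)
        (F := fun r => if r < k then partRow r (r+1) (n'+1) else partRow 0 0 (n'+1))
        (by simp only [lt_irrefl, if_false]; exact partRow_zero 0 k (n'+1))
        (fun r hr => by simp only [if_pos hr]) (k+1) le_rfl]
    apply List.map_congr_left
    intro r _
    by_cases h : r = k
    · subst h; rw [if_pos rfl, if_pos (by omega)]
    · rw [if_neg h]
      by_cases h2 : r < k
      · rw [if_pos h2, if_pos (by omega)]
      · rw [if_neg h2, if_neg (by omega)]

lemma A_eq (n' : Nat) : maxcoefficientvalue (n' : Int) = ((n'.choose (n'/2) : Nat) : Int) := by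
  simp only [maxcoefficientvalue]
  have hcast : ((n' : Int) + 1) = ((n'+1 : Nat) : Int) := by push_cast; ring
  rw [hcast]
  have hC0 : (PySem.List.pyRange 0 ((n'+1 : Nat) : Int) 1).map (fun _ =>
      (PySem.List.pyRange 0 ((n'+1 : Nat) : Int) 1).map (fun _ => (0:Int)))
      = (List.range (n'+1)).map (fun _ => partRow 0 0 (n'+1)) := by
    rw [PySem.List.pyRange_one]
    simp [partRow, entryA, List.map_map, Function.comp_def]
  rw [hC0, outer_loop n' (n'+1) le_rfl]
  have hrow : PySem.List.pyGetD
      ((List.range (n'+1)).map (fun r => if r < n'+1 then partRow r (r+1) (n'+1) else partRow 0 0 (n'+1)))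
      (n' : Int) [] = partRow n' (n'+1) (n'+1) := by
    rw [getD_map_range' _ (n'+1) n' (by omega) []]
    rw [if_pos (by omega)]
  rw [hrow]
  -- the final max-scan over row n'
  have hlen : ((n'+1 : Nat) : Int) = ((partRow n' (n'+1) (n'+1)).length : Int) := by
    simp [partRow]
  rw [hlen, PySem.List.foldl_pyRange_zero_pyGetD' (partRow n' (n'+1) (n'+1)) 0 (fun m v => max m v) 0]
  show (partRow n' (n'+1) (n'+1)).foldl max 0 = ((n'.choose (n'/2) : Nat) : Int)
  have hub : ∀ y ∈ partRow n' (n'+1) (n'+1), y ≤ ((n'.choose (n'/2) : Nat) : Int) := by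
    intro y hy
    obtain ⟨j, hj, rfl⟩ := List.mem_map.1 hy
    simp only [entryA, if_pos (by simpa using hj : j < n'+1)]
    exact_mod_cast Nat.choose_le_middle j n'
  have hin : ((n'.choose (n'/2) : Nat) : Int) ∈ partRow n' (n'+1) (n'+1) := by
    apply List.mem_map.2
    exact ⟨n'/2, List.mem_range.2 (by omega), by
      simp only [entryA, if_pos (show n'/2 < n'+1 by omega)]⟩
  apply le_antisymm
  · rcases PySem.List.foldl_max_mem (partRow n' (n'+1) (n'+1)) 0 with h | h
    · rw [h]; positivity
    · exact hub _ h
  · exact (PySem.List.le_foldl_max (partRow n' (n'+1) (n'+1)) 0).2 _ hin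

lemma altLoop (n' : Nat) : ∀ t, t ≤ n'/2 →
    (PySem.List.pyRange 0 (t : Int) 1).foldl
      (fun res i => PySem.Int.floordiv (res * ((n' : Int) - i)) (i + 1)) 1
    = ((n'.choose t : Nat) : Int) := by
  intro t
  induction t with
  | zero =>
    intro _
    rw [PySem.List.pyRange_one_eq_nil (by simp)]
    simp
  | succ t ih =>
    intro ht
    rw [show ((t+1 : Nat) : Int) = (t : Int) + 1 by push_cast; ring,
        PySem.List.pyRange_one_succ_right (by positivity), List.foldl_append, ih (by omega)]
    simp only [List.foldl_cons, List.foldl_nil]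
    have htn : t ≤ n' := by
      have := Nat.div_le_self n' 2
      omega
    have h1 : ((n' : Int) - (t : Int)) = ((n' - t : Nat) : Int) := by omega
    rw [h1, show ((t : Int) + 1) = ((t+1 : Nat) : Int) by push_cast; ring,
        show ((n'.choose t : Nat) : Int) * ((n' - t : Nat) : Int) = ((n'.choose t * (n' - t) : Nat) : Int) by push_cast; ring,
        ← Nat.choose_succ_right_eq, PySem.Int.floordiv_natCast,
        Nat.mul_div_cancel _ (by omega)]

lemma B_eq (n' : Nat) : maxcoefficientvalue_alt (n' : Int) = ((n'.choose (n'/2) : Nat) : Int) := by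
  simp only [maxcoefficientvalue_alt]
  rw [if_neg (by omega)]
  have h : PySem.Int.floordiv (n' : Int) 2 = ((n'/2 : Nat) : Int) := by
    exact_mod_cast PySem.Int.floordiv_natCast n' 2
  rw [h, altLoop n' (n'/2) le_rfl]

lemma A_neg (n : Int) (hn : n < 0) : maxcoefficientvalue n = 0 := by
  simp only [maxcoefficientvalue]
  rw [PySem.List.pyRange_one_eq_nil (by omega)]
  simp

-- ===== VERDICT (by name: the statement is the Claim_ definition above) =====
theorem maxcoefficientvalue_spec : Claim_equal_maxcoefficientvalue := by
  intro n _
  unfold Spec_maxcoefficientvalue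
  by_cases hn : 0 ≤ n
  · obtain ⟨n', rfl⟩ := Int.eq_ofNat_of_zero_le hn
    rw [A_eq, B_eq]
  · rw [A_neg n (by omega)]
    unfold maxcoefficientvalue_alt
    rw [if_pos (by omega)]
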